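-- pv_equiv track=rewrite | github.com/j4ptl/Doppio-Box | backend/app/bench.py | _has_shell_metacharacters
-- ===== SOURCE A (Python) =====
-- def _has_shell_metacharacters(raw_command: str) -> bool:
--   blocked = {
--     "\n",
--     "\r",
--     ";",
--     "&",
--     "|",
--     ">",
--     "<",
--     "`",
--     "$",
--     "(",
--     ")",
--   }
--
--   return any(character in raw_command for character in blocked)
-- ===== SOURCE B (Python) =====
-- # One forward pass over the input; each character is classified by indexing
-- # into a precomputed bitmask of blocked code points (bit ord(c) set iff c is blocked).
-- _BLOCKED_MASK = (
--     (1 << 10) | (1 << 13) | (1 << 36) | (1 << 38) | (1 << 40) | (1 << 41)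
--     | (1 << 59) | (1 << 60) | (1 << 62) | (1 << 96) | (1 << 124)
-- )
--
-- def _has_shell_metacharacters(raw_command: str) -> bool:
--     for character in raw_command:
--         if (_BLOCKED_MASK >> ord(character)) & 1:
--             return True
--     return False
-- ===== Notes on version B (the rewrite author's own statement) =====
-- stated objective: alternative
-- what changed: B makes a single early-exit pass over the input, classifying each character by one shift-and-mask lookup into a precomputed integer bitmask of the blocked code points, instead of A's eleven separate substring scans of the whole input (one per blocked character).
import Mathlib
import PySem

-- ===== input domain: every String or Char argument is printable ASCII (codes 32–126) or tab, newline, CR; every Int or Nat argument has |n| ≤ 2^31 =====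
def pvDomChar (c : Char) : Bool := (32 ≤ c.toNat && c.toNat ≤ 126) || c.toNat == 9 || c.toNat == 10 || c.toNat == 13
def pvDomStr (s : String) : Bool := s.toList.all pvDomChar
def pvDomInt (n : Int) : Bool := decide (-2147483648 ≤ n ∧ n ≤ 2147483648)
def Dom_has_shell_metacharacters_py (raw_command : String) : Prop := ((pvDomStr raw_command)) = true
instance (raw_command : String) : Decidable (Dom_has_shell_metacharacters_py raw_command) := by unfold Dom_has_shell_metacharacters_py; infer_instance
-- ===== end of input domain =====

-- B replaces A's eleven per-blocked-character substring scans of the whole input with one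
-- early-exit pass over the input, testing each character by a shift-and-mask lookup into a
-- precomputed integer bitmask of the blocked code points (alternative decomposition).

-- ===== PORT A =====
-- A: blocked is a set of 11 one-character strings; any(character in raw_command ...) is a
-- substring-membership scan per blocked element (order of iteration does not affect `any`).
def pvBlockedStrs : PySem.Set String :=
  PySem.Set.ofList ["\n", "\r", ";", "&", "|", ">", "<", "`", "$", "(", ")"]

def has_shell_metacharacters_py (raw_command : String) : Bool :=
  pvBlockedStrs.any (fun character => PySem.Str.isIn character raw_command)

-- ===== PORT B =====
-- B: module constant _BLOCKED_MASK, then the for-loop with early return, one bit test per char.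
def pvBlockedMask : Nat :=
  (1 <<< 10) ||| (1 <<< 13) ||| (1 <<< 36) ||| (1 <<< 38) ||| (1 <<< 40) ||| (1 <<< 41)
    ||| (1 <<< 59) ||| (1 <<< 60) ||| (1 <<< 62) ||| (1 <<< 96) ||| (1 <<< 124)

-- the `for character in raw_command: if ...: return True` loop, on the char list
def pvScan : List Char → Bool
  | [] => false
  | character :: rest =>
      if (pvBlockedMask >>> character.toNat) &&& 1 ≠ 0 then true else pvScan rest

def has_shell_metacharacters_py_alt (raw_command : String) : Bool :=
  pvScan raw_command.toList

-- ===== PRECONDITION & SPEC =====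
def Spec_has_shell_metacharacters_py (raw_command : String) (out : Bool) : Prop := out = has_shell_metacharacters_py_alt raw_command
instance (raw_command : String) (out : Bool) : Decidable (Spec_has_shell_metacharacters_py raw_command out) := by unfold Spec_has_shell_metacharacters_py; infer_instance

-- ===== CLAIM (what is proved, stated in full; the proofs are below) =====
def Claim_equal_has_shell_metacharacters_py : Prop := ∀ (raw_command : String), Dom_has_shell_metacharacters_py raw_command → Spec_has_shell_metacharacters_py raw_command (has_shell_metacharacters_py raw_command)

-- ===== LEMMAS AND PROOFS =====

def pvBlockedChars : List Char := ['\n', '\r', ';', '&', '|', '>', '<', '`', '$', '(', ')']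

theorem pv_singleton_infix_iff {α : Type} (a : α) (l : List α) : [a] <:+: l ↔ a ∈ l := by
  constructor
  · intro h; exact h.mem (List.mem_singleton_self a)
  · intro h
    obtain ⟨s, t, rfl⟩ := List.append_of_mem h
    exact ⟨s, t, by simp⟩

theorem pvA_iff (raw_command : String) :
    has_shell_metacharacters_py raw_command = true ↔
      ∃ c ∈ raw_command.toList, c ∈ pvBlockedChars := by
  unfold has_shell_metacharacters_py pvBlockedStrs
  rw [PySem.Set.ofList_eq_self_of_nodup ["\n", "\r", ";", "&", "|", ">", "<", "`", "$", "(", ")"] (by decide)]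
  simp only [List.any_eq_true, PySem.Str.isIn_iff_infix]
  constructor
  · rintro ⟨cs, hcs, hin⟩
    fin_cases hcs <;>
      exact ⟨_, (pv_singleton_infix_iff _ _).mp hin, by decide⟩
  · rintro ⟨c, hc, hb⟩
    refine ⟨String.ofList [c], ?_, ?_⟩
    · simp only [pvBlockedChars, List.mem_cons, List.not_mem_nil, or_false] at hb
      rcases hb with rfl | rfl | rfl | rfl | rfl | rfl | rfl | rfl | rfl | rfl | rfl <;> decide
    · simpa using (pv_singleton_infix_iff c raw_command.toList).mpr hc

-- the bitmask lookup agrees with membership in the blocked characters, for code points < 127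
theorem pv_mask_char (n : Nat) (hn : n < 127) :
    ((pvBlockedMask >>> n) &&& 1 ≠ 0) ↔ n ∈ [10, 13, 36, 38, 40, 41, 59, 60, 62, 96, 124] := by
  revert n
  decide

theorem pv_mask_iff (c : Char) (hc : pvDomChar c = true) :
    ((pvBlockedMask >>> c.toNat) &&& 1 ≠ 0) ↔ c ∈ pvBlockedChars := by
  have h127 : c.toNat < 127 := by
    simp only [pvDomChar, Bool.or_eq_true, Bool.and_eq_true, decide_eq_true_eq, beq_iff_eq] at hc
    omega
  rw [pv_mask_char c.toNat h127]
  constructor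
  · intro h
    have : c = Char.ofNat c.toNat := (Char.ofNat_toNat c).symm
    simp only [List.mem_cons, List.not_mem_nil, or_false] at h
    rcases h with h | h | h | h | h | h | h | h | h | h | h <;>
      (rw [this, h]; decide)
  · intro h
    simp only [pvBlockedChars, List.mem_cons, List.not_mem_nil, or_false] at h
    rcases h with rfl | rfl | rfl | rfl | rfl | rfl | rfl | rfl | rfl | rfl | rfl <;> decide

theorem pvScan_iff (l : List Char) (hd : l.all pvDomChar = true) :
    pvScan l = true ↔ ∃ c ∈ l, c ∈ pvBlockedChars := by
  induction l with
  | nil => simp [pvScan]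
  | cons c rest ih =>
      simp only [List.all_cons, Bool.and_eq_true] at hd
      rw [pvScan]
      split_ifs with h
      · simp [(pv_mask_iff c hd.1).mp h]
      · rw [ih hd.2]
        constructor
        · rintro ⟨d, hdm, hdb⟩; exact ⟨d, List.mem_cons_of_mem _ hdm, hdb⟩
        · rintro ⟨d, hdm, hdb⟩
          rcases List.mem_cons.mp hdm with rfl | hdm'
          · exact absurd ((pv_mask_iff d hd.1).mpr hdb) h
          · exact ⟨d, hdm', hdb⟩

-- ===== VERDICT (by name: the statement is the Claim_ definition above) =====
theorem has_shell_metacharacters_py_spec : Claim_equal_has_shell_metacharacters_py := by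
  intro raw_command hdom
  unfold Spec_has_shell_metacharacters_py has_shell_metacharacters_py_alt
  exact Bool.eq_iff_iff.mpr ((pvA_iff raw_command).trans (pvScan_iff raw_command.toList hdom).symm)
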